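-- pv_equiv track=rewrite | github.com/JonathanHancock0/AoC2015 | 5.py | displacedPairTest
-- ===== SOURCE A (Python) =====
-- def displacedPairTest(line):
--     #There must be a letter that is repeated, with the two letters seperated by exactly one (XaX)
--     first = line[0]
--     second = line[1]
--     for char in line[2:]:
--         if first == char:
--             return True
--         first = second
--         second = char
--     return False
-- ===== SOURCE B (Python) =====
-- def displacedPairTest(line):
--     # A char repeats with exactly one char between iff the even-index
--     # subsequence or the odd-index subsequence contains two equal
--     # ADJACENT characters: line[i] and line[i+2] are adjacent in the
--     # parity-split of line. Two staged passes over the split strings.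
--     def hasAdjacentDouble(s):
--         return any(x == y for x, y in zip(s, s[1:]))
--     return hasAdjacentDouble(line[::2]) or hasAdjacentDouble(line[1::2])
-- ===== Notes on version B (the rewrite author's own statement) =====
-- stated objective: alternative
-- what changed: B splits the string into its even-index and odd-index subsequences and checks each for an adjacent duplicate, instead of sliding a two-variable window over the whole string.
import Mathlib
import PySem

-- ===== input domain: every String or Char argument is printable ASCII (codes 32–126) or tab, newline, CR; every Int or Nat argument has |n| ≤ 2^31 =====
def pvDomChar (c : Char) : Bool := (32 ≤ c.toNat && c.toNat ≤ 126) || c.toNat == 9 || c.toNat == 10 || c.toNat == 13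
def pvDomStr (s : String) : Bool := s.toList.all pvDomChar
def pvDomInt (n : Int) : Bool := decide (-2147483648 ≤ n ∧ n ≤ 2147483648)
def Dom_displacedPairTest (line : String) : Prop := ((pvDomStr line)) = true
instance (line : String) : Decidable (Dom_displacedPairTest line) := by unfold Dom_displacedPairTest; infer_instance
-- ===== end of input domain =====

-- B splits the string into its even-index and odd-index subsequences and checks
-- each for an adjacent duplicate, instead of A's two-variable sliding window.

-- ===== PORT A =====
-- the for-loop over line[2:] carrying the window (first, second)
def pvALoop (first second : Char) : List Char → Bool
  | [] => false
  | c :: rest => if first == c then true else pvALoop second c rest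

def displacedPairTest (line : String) : Bool :=
  match line.toList with
  | a :: b :: rest => pvALoop a b rest
  | _ => false  -- unreachable under Pre_ (Python raises IndexError on line[0]/line[1])

-- ===== PORT B =====
-- line[::2] : the step-2 slice, ported by hand (exact: takes every second char)
def pvEvery2 : List Char → List Char
  | [] => []
  | [a] => [a]
  | a :: _ :: rest => a :: pvEvery2 rest

-- any(x == y for x, y in zip(s, s[1:]))
def pvHasAdjacentDouble (s : List Char) : Bool :=
  (s.zip s.tail).any (fun p => p.1 == p.2)

def displacedPairTest_alt (line : String) : Bool :=
  pvHasAdjacentDouble (pvEvery2 line.toList) ||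
  pvHasAdjacentDouble (pvEvery2 line.toList.tail)

-- ===== PRECONDITION & SPEC =====
-- Pre_ excludes strings of length < 2, on which A raises IndexError.
def Pre_displacedPairTest (line : String) : Prop := 2 ≤ line.toList.length
instance (line : String) : Decidable (Pre_displacedPairTest line) := by unfold Pre_displacedPairTest; infer_instance
def pvWitness_displacedPairTest : String := "xyx"

def Spec_displacedPairTest (line : String) (out : Bool) : Prop := out = displacedPairTest_alt line
instance (line : String) (out : Bool) : Decidable (Spec_displacedPairTest line out) := by unfold Spec_displacedPairTest; infer_instance

-- ===== CLAIM =====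
def Claim_equal_displacedPairTest : Prop := ∀ (line : String), Dom_displacedPairTest line → Pre_displacedPairTest line → Spec_displacedPairTest line (displacedPairTest line)

-- ===== LEMMAS AND PROOFS =====
theorem pvEvery2_cons (c : Char) (m : List Char) :
    pvEvery2 (c :: m) = c :: pvEvery2 m.tail := by
  cases m <;> simp [pvEvery2]

theorem pvHasAdjacentDouble_cons2 (a x : Char) (r : List Char) :
    pvHasAdjacentDouble (a :: x :: r) = ((a == x) || pvHasAdjacentDouble (x :: r)) := by
  simp [pvHasAdjacentDouble]

theorem pvALoop_eq_parity (l : List Char) : ∀ (a b : Char),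
    pvALoop a b l =
      (pvHasAdjacentDouble (a :: pvEvery2 l) || pvHasAdjacentDouble (b :: pvEvery2 l.tail)) := by
  induction l with
  | nil => intro a b; simp [pvALoop, pvEvery2, pvHasAdjacentDouble]
  | cons c m ih =>
      intro a b
      rw [show (c :: m).tail = m from rfl, pvEvery2_cons,
        pvHasAdjacentDouble_cons2, pvALoop, ih b c]
      cases a == c <;> cases pvHasAdjacentDouble (b :: pvEvery2 m) <;>
        cases pvHasAdjacentDouble (c :: pvEvery2 m.tail) <;> simp

-- ===== VERDICT =====
theorem displacedPairTest_spec : Claim_equal_displacedPairTest := by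
  intro line _ hpre
  unfold Spec_displacedPairTest displacedPairTest displacedPairTest_alt
  unfold Pre_displacedPairTest at hpre
  match hcs : line.toList with
  | [] => simp [hcs] at hpre
  | [a] => simp [hcs] at hpre
  | a :: b :: rest =>
      show pvALoop a b rest = _
      rw [pvALoop_eq_parity rest a b]
      rw [show (a :: b :: rest).tail = b :: rest from rfl,
        show pvEvery2 (a :: b :: rest) = a :: pvEvery2 rest from rfl,
        pvEvery2_cons]
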